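-- pv_equiv track=rewrite | github.com/claytonjwong/advent-of-code | leetcode-py/clone2/1580_put_boxes_in_warehouse_2.py | maxBoxesInWarehouse
-- ===== SOURCE A (Python) =====
-- from typing import List
--
-- def maxBoxesInWarehouse(box: List[int], spot: List[int], cnt = 0) -> int:
--     box.sort(reverse = True)
--     i = 0
--     j = len(spot) - 1
--     k = 0
--     while i <= j and k < len(box):
--         if box[k] <= max(spot[i], spot[j]):
--             cnt += 1
--             if spot[i] < spot[j]:
--                 j -= 1
--             else:
--                 i += 1
--         k += 1
--     return cnt
-- ===== SOURCE B (Python) =====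
-- def maxBoxesInWarehouse(box, spot, cnt=0):
--     box.sort(reverse=True)
--     pref = []
--     for h in spot:
--         pref.append(h if not pref else min(pref[-1], h))
--     suf = []
--     for h in reversed(spot):
--         suf.append(h if not suf else min(suf[-1], h))
--     suf.reverse()
--     eff = sorted((max(p, q) for p, q in zip(pref, suf)), reverse=True)
--     t = 0
--     for b in box:
--         if t < len(eff) and b <= eff[t]:
--             cnt += 1
--             t += 1
--     return cnt
-- ===== Notes on version B (the rewrite author's own statement) =====
-- stated objective: alternative
-- what changed: A walks spot live with two pointers, comparing each box to max(spot[i], spot[j]) and shrinking the window as it goes; B instead precomputes an effective-height array (elementwise max of prefix and suffix running minima of spot), sorts it descending, and counts matches with a single greedy index walk over the sorted boxes.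
import Mathlib
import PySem

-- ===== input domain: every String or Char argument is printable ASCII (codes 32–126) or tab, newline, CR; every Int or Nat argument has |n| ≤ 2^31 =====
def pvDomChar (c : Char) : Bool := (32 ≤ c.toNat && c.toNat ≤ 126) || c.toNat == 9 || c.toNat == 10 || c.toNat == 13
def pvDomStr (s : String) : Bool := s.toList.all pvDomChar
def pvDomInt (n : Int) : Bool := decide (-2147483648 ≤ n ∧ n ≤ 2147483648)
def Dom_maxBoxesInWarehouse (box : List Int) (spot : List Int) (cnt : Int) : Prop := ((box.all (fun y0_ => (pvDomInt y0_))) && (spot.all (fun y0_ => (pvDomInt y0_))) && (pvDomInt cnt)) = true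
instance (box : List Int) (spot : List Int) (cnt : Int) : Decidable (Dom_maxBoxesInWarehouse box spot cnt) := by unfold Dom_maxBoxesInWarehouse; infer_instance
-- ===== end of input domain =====

-- B replaces A's live two-pointer scan of spot with a precomputed effective-height
-- array (prefix/suffix running minima, elementwise max) sorted descending plus one
-- greedy walk (objective: alternative decomposition, same cost). Both A and B sort
-- `box` in place (same mutation); the equivalence proved is about the return value.

-- ===== PORT A =====
-- A's while loop: iterate over the descending-sorted boxes with two indices i, j into spot.
def pvAgo (spot : List Int) : List Int → Int → Int → Int → Int
  | [], _, _, cnt => cnt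
  | b :: bs, i, j, cnt =>
    if i ≤ j then
      let si := (PySem.List.pyGet? spot i).getD 0  -- index in range whenever the loop guard holds
      let sj := (PySem.List.pyGet? spot j).getD 0
      if b ≤ max si sj then
        if si < sj then pvAgo spot bs i (j - 1) (cnt + 1)
        else pvAgo spot bs (i + 1) j (cnt + 1)
      else pvAgo spot bs i j cnt
    else cnt

def maxBoxesInWarehouse (box : List Int) (spot : List Int) (cnt : Int) : Int :=
  pvAgo spot (PySem.List.sorted box (fun x => x) true) 0 ((spot.length : Int) - 1) cnt

-- ===== PORT B =====
-- running minima of xs, built front-to-back exactly as Source B's append loop does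
def pvPrefFold (xs : List Int) : List Int :=
  xs.foldl (fun pref h => pref ++ [match pref.getLast? with | none => h | some m => min m h]) []

-- Source B's final loop: pointer t into eff, counter cnt
def pvBgo (eff : List Int) : List Int → Int → Int → Int
  | [], _, cnt => cnt
  | b :: bs, t, cnt =>
    if t < (eff.length : Int) ∧ b ≤ (PySem.List.pyGet? eff t).getD 0 then
      pvBgo eff bs (t + 1) (cnt + 1)
    else pvBgo eff bs t cnt

def maxBoxesInWarehouse_alt (box : List Int) (spot : List Int) (cnt : Int) : Int :=
  let bs := PySem.List.sorted box (fun x => x) true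
  let pref := pvPrefFold spot
  let suf := (pvPrefFold spot.reverse).reverse
  let eff := PySem.List.sorted (List.zipWith max pref suf) (fun x => x) true
  pvBgo eff bs 0 cnt

-- ===== PRECONDITION & SPEC =====
def Spec_maxBoxesInWarehouse (box : List Int) (spot : List Int) (cnt : Int) (out : Int) : Prop := out = maxBoxesInWarehouse_alt box spot cnt
instance (box : List Int) (spot : List Int) (cnt : Int) (out : Int) : Decidable (Spec_maxBoxesInWarehouse box spot cnt out) := by unfold Spec_maxBoxesInWarehouse; infer_instance

-- ===== CLAIM (what is proved, stated in full; the proofs are below) =====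
def Claim_equal_maxBoxesInWarehouse : Prop := ∀ (box : List Int) (spot : List Int) (cnt : Int), Dom_maxBoxesInWarehouse box spot cnt → Spec_maxBoxesInWarehouse box spot cnt (maxBoxesInWarehouse box spot cnt)

-- ===== LEMMAS AND PROOFS =====

-- prefix minima, recursively
def pvPM : List Int → List Int
  | [] => []
  | a :: t => a :: (pvPM t).map (min a)

-- suffix minima
def pvSM (xs : List Int) : List Int := (pvPM xs.reverse).reverse

-- effective heights: a box reaches room p iff it fits all rooms to the left or all to the right
def pvEff (xs : List Int) : List Int := List.zipWith max (pvPM xs) (pvSM xs)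

-- the box-independent "peel" sequence of A's window: max of the two ends, larger end removed
def pvPeel : List Int → List Int
  | [] => []
  | a :: t =>
    if a < t.getLastD a then t.getLastD a :: pvPeel ((a :: t).dropLast)
    else a :: pvPeel t
termination_by l => l.length
decreasing_by
  · simp
  · simp

-- index form of the peel sequence, matching A's i/j bookkeeping
def pvPeelIJ (spot : List Int) (i j : Int) : List Int :=
  if i ≤ j then
    let si := (PySem.List.pyGet? spot i).getD 0
    let sj := (PySem.List.pyGet? spot j).getD 0
    if si < sj then sj :: pvPeelIJ spot i (j - 1)
    else si :: pvPeelIJ spot (i + 1) j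
  else []
termination_by (j + 1 - i).toNat
decreasing_by all_goals omega

-- prefix-minimization of a capacity list
def pvPmin : List Int → List Int
  | [] => []
  | c :: cs => c :: pvPmin (cs.map (min c))
termination_by l => l.length
decreasing_by simp

-- skip-greedy: boxes in the given order against capacities consumed front-to-back
def pvSkipG : List Int → List Int → Int → Int
  | _, [], cnt => cnt
  | [], _ :: _, cnt => cnt
  | c :: cs, b :: bs, cnt => if b ≤ c then pvSkipG cs bs (cnt + 1) else pvSkipG (c :: cs) bs cnt

theorem pvAgo_eq_skipG (spot : List Int) (bs : List Int) :
    ∀ (i j cnt : Int), pvAgo spot bs i j cnt = pvSkipG (pvPeelIJ spot i j) bs cnt := by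
  induction bs with
  | nil => intro i j cnt; cases h : pvPeelIJ spot i j <;> simp [pvAgo, pvSkipG]
  | cons b bs ih =>
    intro i j cnt
    rw [pvPeelIJ]
    simp only [pvAgo]
    by_cases hij : i ≤ j
    · simp only [hij, if_true]
      by_cases hlt : (PySem.List.pyGet? spot i).getD 0 < (PySem.List.pyGet? spot j).getD 0
      · have hmax : max ((PySem.List.pyGet? spot i).getD 0) ((PySem.List.pyGet? spot j).getD 0)
            = (PySem.List.pyGet? spot j).getD 0 := max_eq_right hlt.le
        simp only [hlt, if_true, hmax, pvSkipG]
        split_ifs with hb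
        · exact ih i (j - 1) (cnt + 1)
        · exact (ih i j cnt).trans (by rw [pvPeelIJ]; simp [hij, hlt])
      · have hmax : max ((PySem.List.pyGet? spot i).getD 0) ((PySem.List.pyGet? spot j).getD 0)
            = (PySem.List.pyGet? spot i).getD 0 := max_eq_left (by omega)
        simp only [hlt, if_false, hmax, pvSkipG]
        split_ifs with hb
        · exact ih (i + 1) j (cnt + 1)
        · exact (ih i j cnt).trans (by rw [pvPeelIJ]; simp [hij, hlt])
    · simp [hij, pvSkipG]

theorem pvPeelIJ_eq_peel (spot : List Int) :
    ∀ (n : Nat) (i j : Int), (j + 1 - i).toNat ≤ n → 0 ≤ i → j < (spot.length : Int) →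
      pvPeelIJ spot i j = pvPeel ((spot.take (j + 1).toNat).drop i.toNat) := by
  intro n
  induction n with
  | zero =>
    intro i j hn hi hj
    have hij : ¬ i ≤ j := by omega
    rw [pvPeelIJ]
    have hnil : (spot.take (j + 1).toNat).drop i.toNat = [] := by
      apply List.drop_eq_nil_of_le
      simp [List.length_take]
      omega
    rw [hnil]
    simp [hij, pvPeel]
  | succ n ih =>
    intro i j hn hi hj
    by_cases hij : i ≤ j
    · have hlen : ((spot.take (j + 1).toNat).drop i.toNat).length = (j + 1).toNat - i.toNat := by
        simp [List.length_take]
        omega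
      obtain ⟨a, t, hw⟩ : ∃ a t, (spot.take (j + 1).toNat).drop i.toNat = a :: t := by
        cases h : (spot.take (j + 1).toNat).drop i.toNat with
        | nil => rw [h] at hlen; simp at hlen; omega
        | cons a t => exact ⟨a, t, rfl⟩
      have hget : ∀ k : Nat, k < (j + 1).toNat - i.toNat →
          ((spot.take (j + 1).toNat).drop i.toNat)[k]? = spot[i.toNat + k]? := by
        intro k hk
        rw [List.getElem?_drop, List.getElem?_take, if_pos (by omega)]
      have hilt : i.toNat < spot.length := by omega
      have hjlt : j.toNat < spot.length := by omega
      have ha : a = spot[i.toNat]'hilt := by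
        have h0 := hget 0 (by omega)
        rw [hw] at h0
        simp only [List.getElem?_cons_zero, Nat.add_zero,
          List.getElem?_eq_getElem hilt, Option.some_inj] at h0
        exact h0
      have hlastD : t.getLastD a = spot[j.toNat]'hjlt := by
        have h1 := hget ((j + 1).toNat - i.toNat - 1) (by omega)
        have hx : i.toNat + ((j + 1).toNat - i.toNat - 1) = j.toNat := by omega
        rw [hx, hw] at h1
        have hlen' : t.length = (j + 1).toNat - i.toNat - 1 := by
          have h2 := hlen
          rw [hw] at h2
          simp at h2
          omega
        rw [← hlen'] at h1
        have h3 : (a :: t).getLast? = (a :: t)[t.length]? := by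
          rw [List.getLast?_eq_getElem?]
          simp
        rw [← h3, List.getLast?_cons, List.getElem?_eq_getElem hjlt] at h1
        rw [List.getLastD_eq_getLast?]
        exact Option.some_inj.mp h1
      have hsi : (PySem.List.pyGet? spot i).getD 0 = spot[i.toNat]'hilt := by
        rw [PySem.List.pyGet?_eq_some_getElem spot hi (by omega)]
        rfl
      have hsj : (PySem.List.pyGet? spot j).getD 0 = spot[j.toNat]'hjlt := by
        rw [PySem.List.pyGet?_eq_some_getElem spot (by omega) (by omega)]
        rfl
      rw [pvPeelIJ]
      simp only [hij, if_true, hsi, hsj]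
      rw [hw, pvPeel, hlastD, ← ha]
      by_cases hc : a < spot[j.toNat]'hjlt
      · simp only [hc, if_true]
        have hdrop : ((spot.take (j + 1).toNat).drop i.toNat).dropLast
            = (spot.take (j - 1 + 1).toNat).drop i.toNat := by
          apply List.ext_getElem
          · simp [List.length_dropLast, List.length_take]
            omega
          · intro k h1 h2
            simp only [List.getElem_dropLast, List.getElem_drop, List.getElem_take]
        rw [← hw, hdrop, ← ih i (j - 1) (by omega) hi (by omega)]
      · simp only [hc, if_false]
        have htail : t = (spot.take (j + 1).toNat).drop (i + 1).toNat := by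
          have h1 : ((spot.take (j + 1).toNat).drop i.toNat).tail
              = (spot.take (j + 1).toNat).drop (i.toNat + 1) := List.tail_drop
          rw [hw] at h1
          simp at h1
          rw [h1]
          congr 1
          omega
        rw [htail, ← ih (i + 1) j (by omega) (by omega) hj]
    · rw [pvPeelIJ]
      have hnil : (spot.take (j + 1).toNat).drop i.toNat = [] := by
        apply List.drop_eq_nil_of_le
        simp [List.length_take]
        omega
      rw [hnil]
      simp [hij, pvPeel]

theorem pvSkipG_nil : ∀ (caps : List Int) (cnt : Int), pvSkipG caps [] cnt = cnt := by
  intro caps cnt; cases caps <;> simp [pvSkipG]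

theorem pvSkipG_map_min (m : Int) :
    ∀ (bs : List Int), (∀ x ∈ bs, x ≤ m) → ∀ (caps : List Int) (cnt : Int),
      pvSkipG caps bs cnt = pvSkipG (caps.map (min m)) bs cnt := by
  intro bs
  induction bs with
  | nil => intro _ caps cnt; rw [pvSkipG_nil, pvSkipG_nil]
  | cons b bs ih =>
    intro hb caps cnt
    cases caps with
    | nil => simp [pvSkipG]
    | cons c cs =>
      have hbm : b ≤ m := hb b (by simp)
      have hrest : ∀ x ∈ bs, x ≤ m := fun x hx => hb x (by simp [hx])
      simp only [List.map_cons, pvSkipG]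
      by_cases h : b ≤ c
      · simp only [h, if_true, if_pos (show b ≤ min m c by omega)]
        exact ih hrest cs (cnt + 1)
      · simp only [h, if_false, if_neg (show ¬ b ≤ min m c by omega)]
        exact ih hrest (c :: cs) cnt

theorem pvSkipG_pmin :
    ∀ (bs : List Int), bs.Pairwise (fun a b => b ≤ a) → ∀ (caps : List Int) (cnt : Int),
      pvSkipG caps bs cnt = pvSkipG (pvPmin caps) bs cnt := by
  intro bs
  induction bs with
  | nil => intro _ caps cnt; rw [pvSkipG_nil, pvSkipG_nil]
  | cons b bs ih =>
    intro hp caps cnt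
    rw [List.pairwise_cons] at hp
    obtain ⟨hble, hbs⟩ := hp
    cases caps with
    | nil => simp [pvPmin, pvSkipG]
    | cons c cs =>
      rw [pvPmin]
      simp only [pvSkipG]
      by_cases h : b ≤ c
      · simp only [h, if_true]
        rw [pvSkipG_map_min c bs (fun x hx => (hble x hx).trans h) cs (cnt + 1)]
        exact ih hbs (cs.map (min c)) (cnt + 1)
      · simp only [h, if_false]
        rw [ih hbs (c :: cs) cnt, pvPmin]

theorem pvPmin_map_min :
    ∀ (n : Nat) (l : List Int) (a : Int), l.length ≤ n →
      pvPmin (l.map (min a)) = (pvPmin l).map (min a) := by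
  intro n
  induction n with
  | zero =>
    intro l a h
    have hl : l = [] := List.length_eq_zero_iff.mp (by omega)
    subst hl
    simp [pvPmin]
  | succ n ih =>
    intro l a h
    cases l with
    | nil => simp [pvPmin]
    | cons c cs =>
      have e1 : (c :: cs).map (min a) = min a c :: cs.map (min a) := rfl
      rw [e1, pvPmin, pvPmin]
      simp only [List.map_cons]
      congr 1
      have e2 : (cs.map (min a)).map (min (min a c)) = (cs.map (min c)).map (min a) := by
        rw [List.map_map, List.map_map]
        apply List.map_congr_left
        intro x _
        simp only [Function.comp_apply]
        omega
      rw [e2, ih (cs.map (min c)) a (by simp; simp at h; omega)]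

theorem pvPmin_le (c : Int) :
    ∀ (n : Nat) (l : List Int), l.length ≤ n → (∀ x ∈ l, x ≤ c) → ∀ y ∈ pvPmin l, y ≤ c := by
  intro n
  induction n with
  | zero =>
    intro l h _ y hy
    have hl : l = [] := List.length_eq_zero_iff.mp (by omega)
    subst hl
    simp [pvPmin] at hy
  | succ n ih =>
    intro l h hl y hy
    cases l with
    | nil => simp [pvPmin] at hy
    | cons d ds =>
      rw [pvPmin] at hy
      rcases List.mem_cons.mp hy with h1 | h1
      · subst h1; exact hl y (by simp)
      · refine ih (ds.map (min d)) (by simp; simp at h; omega) ?_ y h1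
        intro x hx
        simp at hx
        obtain ⟨z, hz, hzx⟩ := hx
        have := hl z (by simp [hz])
        omega

theorem pvPmin_pairwise : ∀ (n : Nat) (l : List Int), l.length ≤ n →
    (pvPmin l).Pairwise (fun a b => b ≤ a) := by
  intro n
  induction n with
  | zero =>
    intro l h
    have hl : l = [] := List.length_eq_zero_iff.mp (by omega)
    subst hl
    simp [pvPmin]
  | succ n ih =>
    intro l h
    cases l with
    | nil => simp [pvPmin]
    | cons c cs =>
      rw [pvPmin, List.pairwise_cons]
      constructor
      · intro y hy
        refine pvPmin_le c cs.length (cs.map (min c)) (by simp) ?_ y hy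
        intro x hx
        simp at hx
        obtain ⟨z, _, hzx⟩ := hx
        omega
      · exact ih (cs.map (min c)) (by simp; simp at h; omega)

theorem pvPM_length (l : List Int) : (pvPM l).length = l.length := by
  induction l with
  | nil => simp [pvPM]
  | cons a t ih => simp [pvPM, ih]

theorem pvSM_length (l : List Int) : (pvSM l).length = l.length := by
  simp [pvSM, pvPM_length]

theorem pvFoldlMin_min : ∀ (u : List Int) (x y : Int),
    u.foldl min (min x y) = min x (u.foldl min y) := by
  intro u
  induction u with
  | nil => intro x y; simp
  | cons c u ih =>
    intro x y
    simp only [List.foldl_cons]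
    rw [min_assoc, ih]

theorem pvFoldlMin_le : ∀ (u : List Int) (a : Int), u.foldl min a ≤ a := by
  intro u
  induction u with
  | nil => intro a; simp
  | cons c u ih =>
    intro a
    simp only [List.foldl_cons]
    exact (ih (min a c)).trans (by omega)

theorem pvPM_concat (a : Int) : ∀ (u : List Int),
    pvPM (u ++ [a]) = pvPM u ++ [u.foldl min a] := by
  intro u
  induction u with
  | nil => simp [pvPM]
  | cons c u' ih =>
    simp only [List.cons_append, pvPM, ih, List.map_append, List.map_cons, List.map_nil,
      List.foldl_cons]
    rw [show min a c = min c a from min_comm a c, pvFoldlMin_min]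

theorem pvSM_cons (a : Int) (t : List Int) :
    pvSM (a :: t) = t.reverse.foldl min a :: pvSM t := by
  unfold pvSM
  rw [List.reverse_cons, pvPM_concat]
  simp

theorem pvPM_le_head (c : Int) (cs : List Int) : ∀ x ∈ pvPM (c :: cs), x ≤ c := by
  intro x hx
  rw [pvPM] at hx
  rcases List.mem_cons.mp hx with h | h
  · omega
  · simp at h
    obtain ⟨z, _, hz⟩ := h
    omega

theorem pvSM_le_getLast (t : List Int) (g : Int) (ht : t.getLast? = some g) :
    ∀ x ∈ pvSM t, x ≤ g := by
  intro x hx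
  unfold pvSM at hx
  rw [List.mem_reverse] at hx
  have hh : t.reverse.head? = some g := by rw [List.head?_reverse, ht]
  cases hr : t.reverse with
  | nil => rw [hr] at hh; simp at hh
  | cons c cs =>
    rw [hr] at hh hx
    simp only [List.head?_cons, Option.some_inj] at hh
    subst hh
    exact pvPM_le_head c cs x hx

theorem pvZip_map_min (a : Int) :
    ∀ (P S : List Int), (∀ s ∈ S, s ≤ a) →
      List.zipWith max (P.map (min a)) S = (List.zipWith max P S).map (min a) := by
  intro P
  induction P with
  | nil => intro S _; simp
  | cons p P ih =>
    intro S hS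
    cases S with
    | nil => simp
    | cons s S' =>
      have h1 : s ≤ a := hS s (by simp)
      simp only [List.map_cons, List.zipWith_cons_cons]
      rw [ih S' (fun x hx => hS x (by simp [hx]))]
      congr 1
      omega

theorem pvEff_nil : pvEff [] = [] := by simp [pvEff, pvPM, pvSM]

theorem pvEff_cons (a g : Int) (t : List Int) (ht : t.getLast? = some g) (hle : g ≤ a) :
    pvEff (a :: t) = a :: (pvEff t).map (min a) := by
  unfold pvEff
  rw [pvPM, pvSM_cons, List.zipWith_cons_cons]
  congr 1
  · exact max_eq_left (pvFoldlMin_le t.reverse a)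
  · exact pvZip_map_min a (pvPM t) (pvSM t) (fun s hs => (pvSM_le_getLast t g ht s hs).trans hle)

theorem pvPM_reverse (w : List Int) : pvPM w.reverse = (pvSM w).reverse := by
  simp [pvSM]

theorem pvSM_reverse (w : List Int) : pvSM w.reverse = (pvPM w).reverse := by
  simp [pvSM]

theorem pvEff_reverse (w : List Int) : pvEff w.reverse = (pvEff w).reverse := by
  unfold pvEff
  rw [pvPM_reverse, pvSM_reverse, ← List.reverse_zipWith]
  · congr 1
    rw [List.zipWith_comm_of_comm]
    intro a b
    omega
  · rw [pvPM_length, pvSM_length]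

theorem pvPmin_peel_perm :
    ∀ (n : Nat) (w : List Int), w.length ≤ n → (pvPmin (pvPeel w)).Perm (pvEff w) := by
  intro n
  induction n with
  | zero =>
    intro w h
    have hw : w = [] := List.length_eq_zero_iff.mp (by omega)
    subst hw
    simp [pvPeel, pvPmin, pvEff_nil]
  | succ n ih =>
    intro w h
    cases hw : w with
    | nil => simp [pvPeel, pvPmin, pvEff_nil]
    | cons a t =>
      subst hw
      rw [pvPeel]
      by_cases hab : a < t.getLastD a
      · cases hgl : t.getLast? with
        | none =>
          exfalso
          have ht0 : t = [] := List.getLast?_eq_none_iff.mp hgl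
          subst ht0
          simp at hab
        | some g =>
          have htne : t ≠ [] := by intro hc; subst hc; simp at hgl
          have hgd : t.getLastD a = g := by rw [List.getLastD_eq_getLast?, hgl]; rfl
          rw [hgd] at hab ⊢
          simp only [if_pos hab]
          rw [pvPmin, pvPmin_map_min (pvPeel ((a :: t).dropLast)).length _ _ le_rfl]
          have hdll : ((a :: t).dropLast).length ≤ n := by simp at h ⊢; omega
          have hperm1 : (pvPmin (pvPeel ((a :: t).dropLast))).Perm (pvEff ((a :: t).dropLast)) :=
            ih _ hdll
          refine ((hperm1.map (min g)).cons g).trans ?_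
          have hdl : (a :: t).dropLast = a :: t.dropLast := by
            cases t with
            | nil => exact absurd rfl htne
            | cons x xs => simp
          have hgg : t.getLast htne = g := by
            have h1 := List.getLast?_eq_some_getLast htne
            rw [h1] at hgl
            exact Option.some_inj.mp hgl
          have hts : t = t.dropLast ++ [g] := by
            conv_lhs => rw [← List.dropLast_append_getLast htne, hgg]
          have hrevw : (a :: t).reverse = g :: ((a :: t).dropLast).reverse := by
            rw [hdl]
            conv_lhs => rw [hts]
            simp
          have hvlast : (((a :: t).dropLast).reverse).getLast? = some a := by
            rw [List.getLast?_reverse, hdl]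
            rfl
          have heq : pvEff ((a :: t).reverse)
              = g :: (pvEff (((a :: t).dropLast).reverse)).map (min g) := by
            rw [hrevw]
            exact pvEff_cons g a _ hvlast (by omega)
          have p1 : (pvEff (a :: t)).Perm
              (g :: (pvEff ((a :: t).dropLast)).map (min g)) := by
            have e1 : (pvEff (a :: t)).reverse = pvEff ((a :: t).reverse) := (pvEff_reverse _).symm
            have p0 : (pvEff (a :: t)).Perm ((pvEff (a :: t)).reverse) := (List.reverse_perm _).symm
            rw [e1, heq, pvEff_reverse] at p0
            exact p0.trans ((((List.reverse_perm _).map (min g))).cons _)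
          exact p1.symm
      · simp only [if_neg hab]
        rw [pvPmin, pvPmin_map_min (pvPeel t).length _ _ le_rfl]
        cases hgl : t.getLast? with
        | none =>
          have ht0 : t = [] := List.getLast?_eq_none_iff.mp hgl
          subst ht0
          have e0 : pvPeel ([] : List Int) = [] := by simp [pvPeel]
          have e1 : pvPmin ([] : List Int) = [] := by simp [pvPmin]
          rw [e0, e1]
          have e2 : pvEff [a] = [a] := by simp [pvEff, pvPM, pvSM]
          rw [e2]
          simp
        | some g =>
          have hgd : t.getLastD a = g := by rw [List.getLastD_eq_getLast?, hgl]; rfl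
          have hg : g ≤ a := by omega
          rw [pvEff_cons a g t hgl hg]
          exact ((ih t (by simp at h; omega)).map (min a)).cons a

theorem pvPrefFold_eq_PM (xs : List Int) : pvPrefFold xs = pvPM xs := by
  have key : ∀ (ys : List Int) (acc : List Int) (m : Int), acc.getLast? = some m →
      ys.foldl (fun pref h => pref ++ [match pref.getLast? with | none => h | some m => min m h]) acc
        = acc ++ (pvPM ys).map (min m) := by
    intro ys
    induction ys with
    | nil => intro acc m _; simp [pvPM]
    | cons y ys ih =>
      intro acc m hm
      simp only [List.foldl_cons, hm]
      rw [ih (acc ++ [min m y]) (min m y) (by simp)]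
      simp only [pvPM, List.map_cons, List.map_map, List.append_assoc, List.singleton_append]
      congr 2
      apply List.map_congr_left
      intro x _
      simp only [Function.comp_apply]
      omega
  cases xs with
  | nil => simp [pvPrefFold, pvPM]
  | cons x xs =>
    unfold pvPrefFold
    simp only [List.foldl_cons, List.getLast?_nil, List.nil_append]
    rw [key xs [x] x (by simp)]
    simp [pvPM]

theorem pvBgo_stop (eff : List Int) :
    ∀ (bs : List Int) (t cnt : Int), ¬ t < (eff.length : Int) → pvBgo eff bs t cnt = cnt := by
  intro bs
  induction bs with
  | nil => intro t cnt _; simp [pvBgo]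
  | cons b bs ih =>
    intro t cnt ht
    rw [pvBgo]
    simp only [ht, false_and, if_false]
    exact ih t cnt ht

theorem pvBgo_eq_skipG (eff : List Int) :
    ∀ (bs : List Int) (t cnt : Int), 0 ≤ t →
      pvBgo eff bs t cnt = pvSkipG (eff.drop t.toNat) bs cnt := by
  intro bs
  induction bs with
  | nil => intro t cnt _; rw [pvSkipG_nil]; simp [pvBgo]
  | cons b bs ih =>
    intro t cnt ht
    by_cases hlt : t < (eff.length : Int)
    · have htn : t.toNat < eff.length := by omega
      have hdrop : eff.drop t.toNat = eff[t.toNat] :: eff.drop (t.toNat + 1) :=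
        List.drop_eq_getElem_cons htn
      have hget : (PySem.List.pyGet? eff t).getD 0 = eff[t.toNat] := by
        rw [PySem.List.pyGet?_eq_some_getElem eff ht hlt]
        rfl
      rw [pvBgo, hdrop]
      simp only [hlt, true_and, hget, pvSkipG]
      split_ifs with hb
      · rw [ih (t + 1) (cnt + 1) (by omega)]
        have e : (t + 1).toNat = t.toNat + 1 := by omega
        rw [e]
      · rw [ih t cnt ht, hdrop]
    · rw [pvBgo_stop eff (b :: bs) t cnt hlt]
      have e : eff.drop t.toNat = [] := List.drop_eq_nil_of_le (by omega)
      rw [e]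
      simp [pvSkipG]

theorem pvSortedDesc_eq (xs ys : List Int) (hp : ys.Perm xs)
    (hs : ys.Pairwise (fun a b => b ≤ a)) :
    PySem.List.sorted xs (fun x => x) true = ys := by
  refine List.Perm.eq_of_pairwise (fun a b _ _ h1 h2 => le_antisymm h2 h1) ?_ hs
    ((PySem.List.sorted_perm xs (fun x => x) true).trans hp.symm)
  have h := PySem.List.sorted_pairwise_rev (xs := xs) (key := fun x : Int => x)
  simpa using h

-- ===== VERDICT (by name: the statement is the Claim_ definition above) =====
theorem maxBoxesInWarehouse_spec : Claim_equal_maxBoxesInWarehouse := by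
  intro box spot cnt _
  unfold Spec_maxBoxesInWarehouse
  simp only [maxBoxesInWarehouse, maxBoxesInWarehouse_alt]
  have hpair : (PySem.List.sorted box (fun x => x) true).Pairwise (fun a b => b ≤ a) := by
    have h := PySem.List.sorted_pairwise_rev (xs := box) (key := fun x : Int => x)
    simpa using h
  rw [pvAgo_eq_skipG,
    pvPeelIJ_eq_peel spot ((spot.length : Int) - 1 + 1 - 0).toNat 0 ((spot.length : Int) - 1)
      le_rfl le_rfl (by omega)]
  have hwin : (spot.take ((spot.length : Int) - 1 + 1).toNat).drop (0 : Int).toNat = spot := by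
    simp
  rw [hwin, pvSkipG_pmin _ hpair, pvBgo_eq_skipG _ _ 0 cnt le_rfl]
  simp only [Int.toNat_zero, List.drop_zero]
  rw [pvPrefFold_eq_PM, pvPrefFold_eq_PM]
  have heff : List.zipWith max (pvPM spot) ((pvPM spot.reverse).reverse) = pvEff spot := rfl
  rw [heff]
  rw [pvSortedDesc_eq (pvEff spot) (pvPmin (pvPeel spot))
    (pvPmin_peel_perm spot.length spot le_rfl)
    (pvPmin_pairwise (pvPeel spot).length (pvPeel spot) le_rfl)]
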